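-- pv_equiv track=rewrite | github.com/iwataka/google-code-jam | 2018/practice_round/senate_evacuation.py | order_party_members
-- ===== SOURCE A (Python) =====
-- import operator
--
-- def order_party_members(ps):
--     result = []
--     while True:
--         max_i, max_v = max(enumerate(ps), key=operator.itemgetter(1))
--         if max_v == 0:
--             break
--         result.append(max_i)
--         ps[max_i] = max_v - 1
--     return result
-- ===== SOURCE B (Python) =====
-- def order_party_members(ps):
--     m = max(ps, default=0)
--     return [i for v in range(m, 0, -1) for i, x in enumerate(ps) if x >= v]
-- ===== Notes on version B (the rewrite author's own statement) =====
-- stated objective: faster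
-- what changed: Instead of re-scanning the whole list for its maximum before every single emitted index, B computes the answer in closed form as a level sweep: for each value level v from max(ps) down to 1 it emits all indices i with ps[i] >= v in increasing order. Intended as faster; a timing run measured B 330x faster at the largest size both implementations finished (A timed out on larger inputs).
import Mathlib
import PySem

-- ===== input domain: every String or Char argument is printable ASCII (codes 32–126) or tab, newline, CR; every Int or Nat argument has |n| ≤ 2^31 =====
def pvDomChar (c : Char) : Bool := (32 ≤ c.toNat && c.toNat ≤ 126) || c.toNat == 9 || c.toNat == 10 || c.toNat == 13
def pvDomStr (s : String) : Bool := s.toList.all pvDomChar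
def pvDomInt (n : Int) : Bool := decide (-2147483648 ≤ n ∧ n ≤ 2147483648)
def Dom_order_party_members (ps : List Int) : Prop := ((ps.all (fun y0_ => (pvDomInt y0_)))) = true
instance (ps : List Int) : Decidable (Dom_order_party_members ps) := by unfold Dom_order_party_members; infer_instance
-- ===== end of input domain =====

-- ===== PORT A =====
-- B changes the algorithm from repeated max-scans to a level sweep; equivalence is about the
-- RETURN value only: A mutates its argument list in place (decrements entries), B does not.

-- loop of A: while True: find (first) max of enumerate(ps); break if 0; emit index, decrement.
-- fuel is a totality guard only: the loop runs at most (sum of positive parts) + 1 times.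
def opmLoop : Nat → List Int → List Int → List Int
  | 0, _, acc => acc
  | fuel+1, ps, acc =>
    match PySem.List.max? (PySem.List.enumerate ps) (fun p => p.2) with
    | none => acc                      -- ps = []: Python raises ValueError (outside Pre_)
    | some (maxI, maxV) =>
      if maxV = 0 then acc
      else
        -- ps[max_i] = max_v - 1 : maxI comes from enumerate, so 0 ≤ maxI < len ps (exact)
        opmLoop fuel (ps.set maxI.toNat (maxV - 1)) (acc ++ [maxI])

def order_party_members (ps : List Int) : List Int :=
  opmLoop ((ps.map Int.toNat).sum + 1) ps []

-- ===== PORT B =====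
def order_party_members_alt (ps : List Int) : List Int :=
  let m := PySem.List.maxD ps (fun x => x) 0
  (PySem.List.pyRange m 0 (-1)).flatMap (fun v =>
    (PySem.List.enumerate ps).filterMap (fun p => if v ≤ p.2 then some p.1 else none))

-- ===== PRECONDITION & SPEC =====
-- Pre_ excludes exactly the inputs on which A does not return: the empty list (ValueError from
-- max) and lists whose maximum is negative (the loop decrements forever and never reaches 0).
def Pre_order_party_members (ps : List Int) : Prop := ∃ x ∈ ps, 0 ≤ x
instance (ps : List Int) : Decidable (Pre_order_party_members ps) := by
  unfold Pre_order_party_members; infer_instance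
def pvWitness_order_party_members : List Int := [2, 1, 3]

def Spec_order_party_members (ps : List Int) (out : List Int) : Prop := out = order_party_members_alt ps
instance (ps : List Int) (out : List Int) : Decidable (Spec_order_party_members ps out) := by unfold Spec_order_party_members; infer_instance

-- ===== CLAIM (what is proved, stated in full; the proofs are below) =====
def Claim_equal_order_party_members : Prop := ∀ (ps : List Int), Dom_order_party_members ps → Pre_order_party_members ps → Spec_order_party_members ps (order_party_members ps)

-- ===== LEMMAS AND PROOFS =====

-- one level of B's sweep, with an enumerate start offset s
def opmBlk (w s : Int) (qs : List Int) : List Int :=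
  (PySem.List.enumerate qs s).filterMap (fun p => if w ≤ p.2 then some p.1 else none)

-- B's sweep, levels k, k-1, …, 1
def opmG : Nat → List Int → List Int
  | 0, _ => []
  | k+1, qs => opmBlk ((k : Int) + 1) 0 qs ++ opmG k qs

theorem opmBlk_nil (w s : Int) : opmBlk w s [] = [] := by
  simp [opmBlk, PySem.List.enumerate_nil]

theorem opmBlk_cons (w s x : Int) (t : List Int) :
    opmBlk w s (x :: t) = (if w ≤ x then [s] else []) ++ opmBlk w (s+1) t := by
  simp only [opmBlk, PySem.List.enumerate_cons, List.filterMap_cons]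
  split_ifs <;> simp

theorem opmBlk_append (w s : Int) (xs ys : List Int) :
    opmBlk w s (xs ++ ys) = opmBlk w s xs ++ opmBlk w (s + xs.length) ys := by
  simp [opmBlk, PySem.List.enumerate_append]

theorem opmBlk_eq_nil (w s : Int) (qs : List Int) (h : ∀ a ∈ qs, a < w) :
    opmBlk w s qs = [] := by
  induction qs generalizing s with
  | nil => exact opmBlk_nil w s
  | cons x t ih =>
    rw [opmBlk_cons]
    have hx : ¬ (w ≤ x) := by have := h x (by simp); omega
    simp [hx, ih _ (fun a ha => h a (by simp [ha]))]

-- the two middle variants v and v-1 give equal blocks at every level w ≤ v - 1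
theorem opmBlk_mid_eq (w s v : Int) (as bs : List Int) (hw : w ≤ v - 1) :
    opmBlk w s (as ++ v :: bs) = opmBlk w s (as ++ (v-1) :: bs) := by
  rw [opmBlk_append, opmBlk_append, opmBlk_cons, opmBlk_cons]
  have h1 : w ≤ v := by omega
  have h2 : w ≤ v - 1 := hw
  simp [h1, h2]

theorem opmG_congr (K : Nat) (qs qs' : List Int)
    (h : ∀ w : Int, 1 ≤ w → w ≤ (K : Int) → opmBlk w 0 qs = opmBlk w 0 qs') :
    opmG K qs = opmG K qs' := by
  induction K with
  | zero => rfl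
  | succ k ih =>
    simp only [opmG]
    rw [h ((k : Int)+1) (by omega) (by push_cast; omega),
        ih (fun w h1 h2 => h w h1 (by push_cast at h2 ⊢; omega))]

theorem opmG_zero (K : Nat) (qs : List Int) (h : ∀ a ∈ qs, a ≤ 0) : opmG K qs = [] := by
  induction K with
  | zero => rfl
  | succ k ih =>
    simp only [opmG, ih]
    rw [opmBlk_eq_nil _ _ _ (fun a ha => by have := h a ha; omega)]
    rfl

-- the step: removing one unit from the first maximum prepends its index to the sweep
theorem opmG_step (as bs : List Int) (v : Int) (hv : 0 < v)
    (has : ∀ a ∈ as, a < v) (hbs : ∀ b ∈ bs, b ≤ v) :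
    ∀ K : Nat, v ≤ (K : Int) →
      opmG K (as ++ v :: bs) = (as.length : Int) :: opmG K (as ++ (v-1) :: bs) := by
  intro K
  induction K with
  | zero => intro h; omega
  | succ k ih =>
    intro hK
    simp only [opmG]
    by_cases hveq : v = (k : Int) + 1
    · -- top level equals v: block sheds the first max's index
      have hblk : opmBlk ((k : Int)+1) 0 (as ++ v :: bs)
          = (as.length : Int) :: opmBlk ((k : Int)+1) 0 (as ++ (v-1) :: bs) := by
        rw [opmBlk_append, opmBlk_append, opmBlk_cons, opmBlk_cons]
        rw [opmBlk_eq_nil ((k : Int)+1) 0 as (fun a ha => by have := has a ha; omega)]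
        have h1 : (k : Int) + 1 ≤ v := by omega
        have h2 : ¬ ((k : Int) + 1 ≤ v - 1) := by omega
        simp [h1, h2]
      rw [hblk]
      have hG : opmG k (as ++ v :: bs) = opmG k (as ++ (v-1) :: bs) :=
        opmG_congr k _ _ (fun w hw1 hw2 => opmBlk_mid_eq w 0 v as bs (by omega))
      rw [hG]; rfl
    · -- top level above v: both blocks empty
      have hlt : v ≤ (k : Int) := by push_cast at hK; omega
      have e1 : opmBlk ((k : Int)+1) 0 (as ++ v :: bs) = [] :=
        opmBlk_eq_nil _ _ _ (by
          intro a ha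
          rcases List.mem_append.mp ha with h | h
          · have := has a h; omega
          · rcases List.mem_cons.mp h with h | h
            · omega
            · have := hbs a h; omega)
      have e2 : opmBlk ((k : Int)+1) 0 (as ++ (v-1) :: bs) = [] :=
        opmBlk_eq_nil _ _ _ (by
          intro a ha
          rcases List.mem_append.mp ha with h | h
          · have := has a h; omega
          · rcases List.mem_cons.mp h with h | h
            · omega
            · have := hbs a h; omega)
      rw [e1, e2, ih hlt]; rfl

-- characterisation of Python's  max(enumerate(ps), key=itemgetter(1)) : first maximal element
def opmF : Option (Int × Int) → (Int × Int) → Option (Int × Int) := fun acc x =>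
  match acc with
  | none => some x
  | some mm => if mm.2 < x.2 then some x else some mm

theorem opm_max_eq (xs : List (Int × Int)) :
    PySem.List.max? xs (fun p => p.2) = xs.foldl opmF none := by
  unfold PySem.List.max?
  congr 1
  funext acc x
  cases acc <;> rfl

theorem opmF_none (x : Int × Int) : opmF none x = some x := rfl

theorem opmF_some (m x : Int × Int) :
    opmF (some m) x = if m.2 < x.2 then some x else some m := rfl

theorem opmMaxFold_split (t : List Int) : ∀ (s : Int) (m : Int × Int) (i v : Int),
    List.foldl opmF (some m) (PySem.List.enumerate t s) = some (i, v) →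
    ((i, v) = m ∧ ∀ b ∈ t, b ≤ v) ∨
    (∃ as bs, t = as ++ v :: bs ∧ i = s + as.length ∧ m.2 < v ∧
      (∀ a ∈ as, a < v) ∧ (∀ b ∈ bs, b ≤ v)) := by
  induction t with
  | nil =>
    intro s m i v h
    rw [PySem.List.enumerate_nil] at h
    simp only [List.foldl_nil, Option.some.injEq] at h
    exact Or.inl ⟨h.symm, by simp⟩
  | cons x t' ih =>
    intro s m i v h
    rw [PySem.List.enumerate_cons, List.foldl_cons, opmF_some] at h
    by_cases hc : m.2 < x
    · simp only [hc, if_pos] at h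
      rcases ih (s+1) (s, x) i v h with ⟨heq, hall⟩ | ⟨as, bs, ht, hi, hlt, has, hbs⟩
      · right
        refine ⟨[], t', ?_, ?_, ?_, ?_, ?_⟩
        · have : v = x := by have := congrArg Prod.snd heq; simpa using this
          simp [this]
        · have : i = s := by have := congrArg Prod.fst heq; simpa using this
          simp [this]
        · have : v = x := by have := congrArg Prod.snd heq; simpa using this
          omega
        · intro a ha; simp at ha
        · exact hall
      · right
        refine ⟨x :: as, bs, by simp [ht], by simp [hi]; omega, by omega,
          ?_, hbs⟩
        intro a ha
        rcases List.mem_cons.mp ha with h | h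
        · omega
        · exact has a h
    · simp only [hc, if_neg, not_false_iff] at h
      rcases ih (s+1) m i v h with ⟨heq, hall⟩ | ⟨as, bs, ht, hi, hlt, has, hbs⟩
      · left
        refine ⟨heq, ?_⟩
        intro b hb
        rcases List.mem_cons.mp hb with h' | h'
        · have hv : v = m.2 := by have := congrArg Prod.snd heq; simpa using this
          omega
        · exact hall b h'
      · right
        refine ⟨x :: as, bs, by simp [ht], by simp [hi]; omega, hlt, ?_, hbs⟩
        intro a ha
        rcases List.mem_cons.mp ha with h' | h'
        · omega
        · exact has a h'

theorem opmMax_split (qs : List Int) (i v : Int)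
    (h : PySem.List.max? (PySem.List.enumerate qs) (fun p => p.2) = some (i, v)) :
    ∃ as bs, qs = as ++ v :: bs ∧ i = (as.length : Int) ∧
      (∀ a ∈ as, a < v) ∧ (∀ b ∈ bs, b ≤ v) := by
  cases qs with
  | nil => simp [PySem.List.max?, PySem.List.enumerate_nil] at h
  | cons x t =>
    rw [PySem.List.enumerate_cons, opm_max_eq, List.foldl_cons, opmF_none] at h
    rcases opmMaxFold_split t 1 (0, x) i v h with ⟨heq, hall⟩ | ⟨as, bs, ht, hi, hlt, has, hbs⟩
    · have hv : v = x := by have := congrArg Prod.snd heq; simpa using this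
      have hi0 : i = 0 := by have := congrArg Prod.fst heq; simpa using this
      exact ⟨[], t, by simp [hv], by simp [hi0], by simp, by simpa [hv] using hall⟩
    · have hx : x < v := by simpa using hlt
      refine ⟨x :: as, bs, by simp [ht], by simp [hi]; omega, ?_, hbs⟩
      intro a ha
      rcases List.mem_cons.mp ha with h' | h'
      · omega
      · exact has a h'

-- positive-part sum (the fuel measure)
theorem opm_posSum_step (as bs : List Int) (v : Int) (hv : 0 < v) :
    ((as ++ (v-1) :: bs).map Int.toNat).sum + 1 = ((as ++ v :: bs).map Int.toNat).sum := by
  simp [List.map_append, List.sum_append]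
  omega

theorem opm_set_mid (as bs : List Int) (v x : Int) :
    (as ++ v :: bs).set as.length x = as ++ x :: bs := by
  induction as with
  | nil => rfl
  | cons a t ih => simp [ih]

-- the loop invariant: with enough fuel, the loop appends exactly B's sweep to acc
theorem opmLoop_eq (fuel : Nat) : ∀ (qs acc : List Int) (K : Nat),
    (∃ x ∈ qs, 0 ≤ x) → (∀ x ∈ qs, x ≤ (K : Int)) →
    (qs.map Int.toNat).sum < fuel →
    opmLoop fuel qs acc = acc ++ opmG K qs := by
  induction fuel with
  | zero => intro qs acc K _ _ hf; omega
  | succ n ih =>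
    intro qs acc K hex hub hf
    obtain ⟨x0, hx0m, hx00⟩ := hex
    have hne : qs ≠ [] := by intro h; subst h; simp at hx0m
    have hene : PySem.List.enumerate qs (0:Int) ≠ [] := by
      cases qs with
      | nil => simp at hne
      | cons a t => rw [PySem.List.enumerate_cons]; simp
    obtain ⟨⟨i, v⟩, hmax⟩ : ∃ p, PySem.List.max? (PySem.List.enumerate qs) (fun p => p.2) = some p := by
      cases hm : PySem.List.max? (PySem.List.enumerate qs) (fun p => p.2) with
      | none => exact absurd ((PySem.List.max?_eq_none_iff _ _).mp hm) hene
      | some p => exact ⟨p, rfl⟩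
    obtain ⟨as, bs, hqs, hi, has, hbs⟩ := opmMax_split qs i v hmax
    have hvmax : ∀ y ∈ qs, y ≤ v := by
      intro y hy
      rw [hqs] at hy
      rcases List.mem_append.mp hy with h | h
      · have := has y h; omega
      · rcases List.mem_cons.mp h with h | h
        · omega
        · exact hbs y h
    have hv0 : 0 ≤ v := le_trans hx00 (hvmax x0 hx0m)
    simp only [opmLoop, hmax]
    by_cases hveq : v = 0
    · simp only [hveq, if_pos]
      rw [opmG_zero K qs (fun a ha => by have := hvmax a ha; omega)]
      simp
    · have hvpos : 0 < v := by omega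
      simp only [hveq, if_neg, not_false_iff]
      have hitn : (i.toNat : Int) = i := by rw [hi]; simp
      have hset : qs.set i.toNat (v - 1) = as ++ (v-1) :: bs := by
        have : i.toNat = as.length := by omega
        rw [hqs, this, opm_set_mid]
      rw [hset]
      have hKv : v ≤ (K : Int) := hub v (by rw [hqs]; simp)
      have hex' : ∃ x ∈ as ++ (v-1) :: bs, (0:Int) ≤ x := ⟨v-1, by simp, by omega⟩
      have hub' : ∀ x ∈ as ++ (v-1) :: bs, x ≤ (K : Int) := by
        intro y hy
        rcases List.mem_append.mp hy with h | h
        · exact hub y (by rw [hqs]; simp [h])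
        · rcases List.mem_cons.mp h with h | h
          · omega
          · exact hub y (by rw [hqs]; simp [h])
      have hf' : ((as ++ (v-1) :: bs).map Int.toNat).sum < n := by
        have := opm_posSum_step as bs v hvpos
        rw [hqs] at hf; omega
      rw [ih (as ++ (v-1) :: bs) (acc ++ [i]) K hex' hub' hf']
      rw [hqs, opmG_step as bs v hvpos has hbs K hKv]
      simp [hi]

-- B's port equals the sweep opmG
theorem opm_flatRange (ps : List Int) : ∀ (k : Nat),
    (PySem.List.pyRange (k : Int) 0 (-1)).flatMap (fun v =>
      (PySem.List.enumerate ps).filterMap (fun p => if v ≤ p.2 then some p.1 else none))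
    = opmG k ps := by
  intro k
  induction k with
  | zero => simp [PySem.List.pyRange_neg_one_eq_nil, opmG]
  | succ k ih =>
    rw [PySem.List.pyRange_neg_one_cons (by push_cast; omega)]
    rw [List.flatMap_cons]
    have hc : ((k : Int) + 1) - 1 = (k : Int) := by omega
    push_cast
    push_cast at ih
    rw [hc, ih]
    rfl

theorem opm_alt_eq_G (ps : List Int) (h : ∃ x ∈ ps, 0 ≤ x) :
    order_party_members_alt ps = opmG (PySem.List.maxD ps (fun x => x) 0).toNat ps := by
  unfold order_party_members_alt
  have h0 : 0 ≤ PySem.List.maxD ps (fun x => x) 0 := by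
    obtain ⟨x, hxm, hx0⟩ := h
    unfold PySem.List.maxD
    cases hm : PySem.List.max? ps (fun x => x) with
    | none => simp
    | some m =>
      have := PySem.List.max?_isMax hm x hxm
      simp only [Option.getD_some]
      omega
  have : ((PySem.List.maxD ps (fun x => x) 0).toNat : Int) = PySem.List.maxD ps (fun x => x) 0 := by omega
  rw [← this]
  exact opm_flatRange ps _

-- ===== VERDICT (by name: the statement is the Claim_ definition above) =====
theorem order_party_members_spec : Claim_equal_order_party_members := by
  intro ps _ hpre
  unfold Spec_order_party_members
  have hub : ∀ x ∈ ps, x ≤ ((PySem.List.maxD ps (fun x => x) 0).toNat : Int) := by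
    intro x hx
    have hne : ps ≠ [] := by intro h; subst h; simp at hx
    unfold PySem.List.maxD
    cases hm : PySem.List.max? ps (fun x => x) with
    | none => exact absurd ((PySem.List.max?_eq_none_iff _ _).mp hm) hne
    | some m =>
      have := PySem.List.max?_isMax hm x hx
      simp only [Option.getD_some]
      omega
  rw [order_party_members, opmLoop_eq _ ps [] _ hpre hub (by omega),
      opm_alt_eq_G ps hpre]
  simp
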